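-- pv_equiv track=rewrite | github.com/dopexthrone/MeaningWorks | mother/financial_ops.py | detect_billing_cycle
-- ===== SOURCE A (Python) =====
-- from typing import Dict, List, Optional, Tuple
--
-- _BILLING_CYCLE_PATTERNS: Dict[str, List[str]] = {
--     "monthly": ["monthly", "per month", "/mo", "month-to-month", "30 days"],
--     "annual": ["annual", "yearly", "per year", "/yr", "12 months", "365 days"],
--     "quarterly": ["quarterly", "per quarter", "every 3 months", "q1", "q2", "q3", "q4"],
--     "weekly": ["weekly", "per week", "/wk", "7 days"],
--     "one-time": ["one-time", "once", "single payment", "lifetime", "perpetual"],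
--     "usage-based": ["per use", "pay-as-you-go", "metered", "per request", "per call", "per unit"],
-- }
--
-- def detect_billing_cycle(description: str) -> Dict[str, str]:
--     """Detect billing cycle from text description.
--
--     Returns dict with: cycle, confidence, reasoning.
--     """
--     desc_lower = description.lower()
--
--     matches: List[Tuple[str, int]] = []
--     for cycle, patterns in _BILLING_CYCLE_PATTERNS.items():
--         count = sum(1 for p in patterns if p in desc_lower)
--         if count > 0:
--             matches.append((cycle, count))
--
--     if not matches:
--         return {
--             "cycle": "unknown",
--             "confidence": "low",
--             "reasoning": "No billing cycle indicators found in description",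
--         }
--
--     matches.sort(key=lambda x: x[1], reverse=True)
--     best_cycle, best_count = matches[0]
--
--     confidence = "high" if best_count >= 2 else "medium"
--
--     return {
--         "cycle": best_cycle,
--         "confidence": confidence,
--         "reasoning": f"Detected {best_cycle} billing from {best_count} indicator(s)",
--     }
-- ===== SOURCE B (Python) =====
-- from typing import Dict, List
--
-- _BILLING_CYCLE_PATTERNS: Dict[str, List[str]] = {
--     "monthly": ["monthly", "per month", "/mo", "month-to-month", "30 days"],
--     "annual": ["annual", "yearly", "per year", "/yr", "12 months", "365 days"],
--     "quarterly": ["quarterly", "per quarter", "every 3 months", "q1", "q2", "q3", "q4"],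
--     "weekly": ["weekly", "per week", "/wk", "7 days"],
--     "one-time": ["one-time", "once", "single payment", "lifetime", "perpetual"],
--     "usage-based": ["per use", "pay-as-you-go", "metered", "per request", "per call", "per unit"],
-- }
--
-- def _hits(patterns: List[str], text: str) -> int:
--     return len([p for p in patterns if p in text])
--
-- def detect_billing_cycle(description: str) -> Dict[str, str]:
--     """Detect billing cycle: staged passes (count table, max, first index) — no sort."""
--     desc_lower = description.lower()
--     cycles = list(_BILLING_CYCLE_PATTERNS)
--     counts = [_hits(ps, desc_lower) for ps in _BILLING_CYCLE_PATTERNS.values()]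
--     best_count = max(counts)
--     if best_count == 0:
--         return {
--             "cycle": "unknown",
--             "confidence": "low",
--             "reasoning": "No billing cycle indicators found in description",
--         }
--     best_cycle = cycles[counts.index(best_count)]
--     return {
--         "cycle": best_cycle,
--         "confidence": "high" if best_count >= 2 else "medium",
--         "reasoning": f"Detected {best_cycle} billing from {best_count} indicator(s)",
--     }
-- ===== Notes on version B (the rewrite author's own statement) =====
-- stated objective: simpler
-- what changed: Replaces A's accumulate-matches-then-stable-reverse-sort selection by staged passes: build the count table once, take max(counts), and look up the first cycle reaching it via counts.index — no match list and no sort.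
import Mathlib
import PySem

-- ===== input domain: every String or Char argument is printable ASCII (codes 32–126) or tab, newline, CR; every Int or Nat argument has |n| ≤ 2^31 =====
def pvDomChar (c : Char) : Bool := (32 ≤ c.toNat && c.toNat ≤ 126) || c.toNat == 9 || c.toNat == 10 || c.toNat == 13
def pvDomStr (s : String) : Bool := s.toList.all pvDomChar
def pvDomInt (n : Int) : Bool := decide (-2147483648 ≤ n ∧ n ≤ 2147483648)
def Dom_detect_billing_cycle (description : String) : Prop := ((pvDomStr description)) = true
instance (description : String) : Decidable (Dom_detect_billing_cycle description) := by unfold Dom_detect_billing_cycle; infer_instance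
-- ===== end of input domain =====

-- B replaces A's matches-list + stable reverse sort by staged passes (count table, max, first index); objective: simpler.

-- the module constant _BILLING_CYCLE_PATTERNS (dict in insertion order); shared by both Pythons
def pvPatterns : List (String × List String) :=
  [("monthly", ["monthly", "per month", "/mo", "month-to-month", "30 days"]),
   ("annual", ["annual", "yearly", "per year", "/yr", "12 months", "365 days"]),
   ("quarterly", ["quarterly", "per quarter", "every 3 months", "q1", "q2", "q3", "q4"]),
   ("weekly", ["weekly", "per week", "/wk", "7 days"]),
   ("one-time", ["one-time", "once", "single payment", "lifetime", "perpetual"]),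
   ("usage-based", ["per use", "pay-as-you-go", "metered", "per request", "per call", "per unit"])]

-- ===== PORT A =====
-- count = sum(1 for p in patterns if p in desc_lower)
def pvCnt (descLower : String) (patterns : List String) : Int :=
  patterns.foldl (fun a p => if PySem.Str.isIn p descLower then a + 1 else a) 0

def detect_billing_cycle (description : String) : List (String × String) :=
  let descLower := PySem.Str.lower description
  let matchesL : List (String × Int) :=
    pvPatterns.foldl (fun acc cp =>
      let count := pvCnt descLower cp.2
      if count > 0 then acc ++ [(cp.1, count)] else acc) []
  if matchesL = [] then
    [("cycle", "unknown"), ("confidence", "low"),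
     ("reasoning", "No billing cycle indicators found in description")]
  else
    let best := (PySem.List.sorted matchesL (fun x => x.2) true).headD ("", 0)
    let confidence := if best.2 ≥ 2 then "high" else "medium"
    [("cycle", best.1), ("confidence", confidence),
     ("reasoning", "Detected " ++ best.1 ++ " billing from " ++ PySem.Int.toStr best.2 ++ " indicator(s)")]

-- ===== PORT B =====
-- def _hits(patterns, text): return len([p for p in patterns if p in text])
def pvHits (patterns : List String) (text : String) : Int :=
  ((patterns.filter (fun p => PySem.Str.isIn p text)).length : Int)

def detect_billing_cycle_alt (description : String) : List (String × String) :=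
  let descLower := PySem.Str.lower description
  let cycles := pvPatterns.map Prod.fst
  let counts := pvPatterns.map (fun cp => pvHits cp.2 descLower)
  -- max(counts): counts always has 6 entries, so Python's max never raises; the .getD default is never used
  let bestCount := (PySem.List.max? counts (fun x => x)).getD 0
  if bestCount = 0 then
    [("cycle", "unknown"), ("confidence", "low"),
     ("reasoning", "No billing cycle indicators found in description")]
  else
    -- cycles[counts.index(best_count)]: bestCount occurs in counts, so index/get never fail; .getD "" unused
    let bestCycle := ((PySem.List.index? counts bestCount).bind
        (fun i => PySem.List.pyGet? cycles (i : Int))).getD ""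
    [("cycle", bestCycle), ("confidence", if bestCount ≥ 2 then "high" else "medium"),
     ("reasoning", "Detected " ++ bestCycle ++ " billing from " ++ PySem.Int.toStr bestCount ++ " indicator(s)")]

-- ===== PRECONDITION & SPEC =====
def Spec_detect_billing_cycle (description : String) (out : List (String × String)) : Prop := out = detect_billing_cycle_alt description
instance (description : String) (out : List (String × String)) : Decidable (Spec_detect_billing_cycle description out) := by unfold Spec_detect_billing_cycle; infer_instance

-- ===== CLAIM =====
def Claim_equal_detect_billing_cycle : Prop := ∀ (description : String), Dom_detect_billing_cycle description → Spec_detect_billing_cycle description (detect_billing_cycle description)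

-- ===== LEMMAS AND PROOFS =====

-- both counting loops are countP
lemma pvCnt_eq_hits (dl : String) (ps : List String) : pvCnt dl ps = pvHits ps dl := by
  rw [pvCnt, PySem.List.foldl_if_add_one, pvHits, List.countP_eq_length_filter]
  simp

lemma pvCnt_nonneg (dl : String) (ps : List String) : 0 ≤ pvCnt dl ps := by
  rw [pvCnt, PySem.List.foldl_if_add_one]
  positivity

-- rewrite A's matches loop as a foldl over the (cycle, count) pairs
lemma pvFoldA (dl : String) (l : List (String × List String)) (acc : List (String × Int)) :
    l.foldl (fun acc cp =>
      if pvCnt dl cp.2 > 0 then acc ++ [(cp.1, pvCnt dl cp.2)] else acc) acc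
    = (l.map (fun cp => (cp.1, pvCnt dl cp.2))).foldl
        (fun acc x => if x.2 > 0 then acc ++ [x] else acc) acc := by
  induction l generalizing acc with
  | nil => rfl
  | cons cp t ih => simp only [List.foldl_cons, List.map_cons, ih]

-- ---- A-side: head of filter + stable reverse sort is the strict-max fold ----

-- head of insertBy
lemma pvHead_insertBy {α : Type} (x : α × Int) (ys : List (α × Int)) (d : α × Int) :
    (PySem.List.insertBy (fun a b => decide (b.2 < a.2)) x ys).headD d
      = (match ys with | [] => x | y :: _ => if y.2 < x.2 then x else y) := by
  cases ys with
  | nil => rfl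
  | cons y t =>
    simp only [PySem.List.insertBy]
    by_cases h : y.2 < x.2 <;> simp [h]

-- the head of the stable reverse sort of a nonempty list is the strict-max fold
lemma pvHead_sorted_rev {α : Type} (t : List (α × Int)) (y : α × Int) (d : α × Int) :
    (PySem.List.sorted (y :: t) (fun x => x.2) true).headD d
      = t.foldl (fun b x => if x.2 > b.2 then x else b) y := by
  induction t using List.reverseRecOn with
  | nil => rfl
  | append_singleton t x ih =>
    have hsplit : PySem.List.sorted (y :: (t ++ [x])) (fun p : α × Int => p.2) true
        = PySem.List.insertBy (fun a b => decide (b.2 < a.2)) x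
            (PySem.List.sorted (y :: t) (fun p : α × Int => p.2) true) := by
      rw [PySem.List.sorted_rev_eq_foldl_insertBy, PySem.List.sorted_rev_eq_foldl_insertBy,
          ← List.cons_append, List.foldl_append, List.foldl_cons, List.foldl_nil]
    cases hys : PySem.List.sorted (y :: t) (fun p : α × Int => p.2) true with
    | nil => exact absurd ((PySem.List.sorted_eq_nil_iff _ _ _).mp hys) (by simp)
    | cons h hs =>
      have hh : h = t.foldl (fun b x => if x.2 > b.2 then x else b) y := by
        simpa [hys] using ih
      rw [hsplit, hys, pvHead_insertBy]
      simp only [List.foldl_append, List.foldl_cons, List.foldl_nil, ← hh]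

-- the strict-max fold ignores non-positive entries when the accumulator is non-negative
lemma pvFold_filter {α : Type} (l : List (α × Int)) (b : α × Int) (hb : 0 ≤ b.2)
    (hl : ∀ p ∈ l, 0 ≤ p.2) :
    l.foldl (fun b x => if x.2 > b.2 then x else b) b
      = (l.filter (fun x => decide (x.2 > 0))).foldl (fun b x => if x.2 > b.2 then x else b) b := by
  induction l generalizing b with
  | nil => rfl
  | cons x t ih =>
    by_cases hx : x.2 > 0
    · simp only [List.filter_cons, hx, decide_true, List.foldl_cons]
      apply ih
      · by_cases hc : x.2 > b.2
        · simp [hc]; try omega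
        · simp [hc]; try omega
      · exact fun p hp => hl p (List.mem_cons_of_mem _ hp)
    · have hstep : (if x.2 > b.2 then x else b) = b := by
        have := hl x (List.mem_cons_self ..)
        simp only [gt_iff_lt]
        rw [if_neg]; omega
      simp only [List.filter_cons, hx, decide_false, List.foldl_cons, hstep]
      exact ih b hb fun p hp => hl p (List.mem_cons_of_mem _ hp)

-- the fold's count never drops below the initial count
lemma pvFold_snd_ge {α : Type} (t : List (α × Int)) (y : α × Int) :
    y.2 ≤ (t.foldl (fun b x => if x.2 > b.2 then x else b) y).2 := by
  induction t generalizing y with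
  | nil => exact le_refl _
  | cons x t ih =>
    simp only [List.foldl_cons]
    refine le_trans ?_ (ih _)
    by_cases hc : x.2 > y.2
    · simp [hc]; try omega
    · simp [hc]; try omega

-- the selection made by A's filter + stable reverse sort equals the strict-max fold
lemma pvMain (L : List (String × Int)) (hL : ∀ p ∈ L, 0 ≤ p.2)
    (out0 : List (String × String)) (f : String × Int → List (String × String)) :
    (if L.foldl (fun acc x => if x.2 > 0 then acc ++ [x] else acc) ([] : List (String × Int)) = []
     then out0
     else f ((PySem.List.sorted
        (L.foldl (fun acc x => if x.2 > 0 then acc ++ [x] else acc) ([] : List (String × Int)))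
        (fun x => x.2) true).headD ("", 0)))
  = (if (L.foldl (fun b x => if x.2 > b.2 then x else b) ("unknown", 0)).2 = 0
     then out0
     else f (L.foldl (fun b x => if x.2 > b.2 then x else b) ("unknown", 0))) := by
  have hmatches : L.foldl (fun acc x => if x.2 > 0 then acc ++ [x] else acc) ([] : List (String × Int))
      = L.filter (fun x => decide (x.2 > 0)) := by
    simpa using PySem.List.foldl_append_if_eq_filter (fun x : String × Int => decide (x.2 > 0)) L []
  have hbest : L.foldl (fun b x => if x.2 > b.2 then x else b) ("unknown", 0)
      = (L.filter (fun x => decide (x.2 > 0))).foldl (fun b x => if x.2 > b.2 then x else b) ("unknown", 0) :=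
    pvFold_filter L _ (by norm_num) hL
  rw [hmatches, hbest]
  cases hm : L.filter (fun x => decide (x.2 > 0)) with
  | nil => rfl
  | cons y t =>
    have hy : y.2 > 0 := by
      have : y ∈ L.filter (fun x => decide (x.2 > 0)) := by
        rw [hm]; exact List.mem_cons_self ..
      simpa using (List.mem_filter.mp this).2
    have hfold : (y :: t).foldl (fun b x => if x.2 > b.2 then x else b) ("unknown", 0)
        = t.foldl (fun b x => if x.2 > b.2 then x else b) y := by
      simp only [List.foldl_cons]
      congr 1
      simp only [gt_iff_lt]
      rw [if_pos hy]
    have hne : (t.foldl (fun b x => if x.2 > b.2 then x else b) y).2 ≠ 0 := by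
      have := pvFold_snd_ge t y
      omega
    rw [hfold, if_neg (by simp : ¬ (y :: t = [])), if_neg hne, pvHead_sorted_rev]

-- ---- B-side: max / first-index selection equals the strict-max fold ----

-- running max of the counts (Python's max(counts) on the snd projection)
def pvMaxSnd {α : Type} (L : List (α × Int)) (a : Int) : Int :=
  L.foldl (fun a x => max a x.2) a

lemma pvMaxSnd_init_le {α : Type} (L : List (α × Int)) (a : Int) : a ≤ pvMaxSnd L a :=
  (PySem.List.le_foldl_max_int L Prod.snd a).1

lemma pvMaxSnd_ge_mem {α : Type} (L : List (α × Int)) (a : Int) (x : α × Int) (hx : x ∈ L) :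
    x.2 ≤ pvMaxSnd L a :=
  (PySem.List.le_foldl_max_int L Prod.snd a).2 x hx

-- the second component of the strict-max fold is the running max
lemma pvF_snd {α : Type} (L : List (α × Int)) (b : α × Int) :
    (L.foldl (fun b x => if x.2 > b.2 then x else b) b).2 = pvMaxSnd L b.2 := by
  induction L generalizing b with
  | nil => rfl
  | cons x t ih =>
    simp only [List.foldl_cons, pvMaxSnd, List.foldl_cons] at *
    rw [ih]
    congr 1
    by_cases hc : x.2 > b.2
    · simp [hc]; try omega
    · simp [hc]; try omega

-- if nothing beats the accumulator, the strict-max fold returns it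
lemma pvF_id_of_max_eq {α : Type} (L : List (α × Int)) (b : α × Int)
    (h : pvMaxSnd L b.2 = b.2) : L.foldl (fun b x => if x.2 > b.2 then x else b) b = b := by
  induction L generalizing b with
  | nil => rfl
  | cons x t ih =>
    have h' : pvMaxSnd t (max b.2 x.2) = b.2 := h
    have h1 := pvMaxSnd_init_le t (max b.2 x.2)
    have h2 := le_max_left b.2 x.2
    have h3 := le_max_right b.2 x.2
    have hmx : max b.2 x.2 = b.2 := by omega
    have hb2 : pvMaxSnd t b.2 = b.2 := by rw [hmx] at h'; exact h'
    simp only [List.foldl_cons]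
    rw [if_neg (by omega : ¬ x.2 > b.2)]
    exact ih b hb2

-- the first element reaching the maximum is the strict-max fold's result
lemma pvFind_eq_pvF {α : Type} (L : List (α × Int)) (b : α × Int) (m : Int)
    (hm : m = pvMaxSnd L b.2) (h : b.2 < m) :
    L.find? (fun x => decide (m ≤ x.2))
      = some (L.foldl (fun b x => if x.2 > b.2 then x else b) b) := by
  induction L generalizing b with
  | nil =>
    subst hm
    simp only [pvMaxSnd, List.foldl_nil] at h
    omega
  | cons x t ih =>
    have hm' : m = pvMaxSnd t (max b.2 x.2) := hm
    by_cases hx : x.2 > b.2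
    · rw [max_eq_right (by omega : b.2 ≤ x.2)] at hm'
      by_cases hme : m = x.2
      · -- x itself is the maximum: find? stops at x, and the fold returns x
        rw [List.find?_cons_of_pos (by simp [hme])]
        simp only [List.foldl_cons]
        rw [if_pos hx, pvF_id_of_max_eq t x (hm'.symm.trans hme)]
      · -- the maximum lies strictly inside t: skip x, recurse with accumulator x
        have hle : x.2 ≤ m := hm' ▸ pvMaxSnd_init_le t x.2
        have hlt : x.2 < m := lt_of_le_of_ne hle (fun e => hme e.symm)
        rw [List.find?_cons_of_neg (by simp; omega)]
        simp only [List.foldl_cons]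
        rw [if_pos hx]
        exact ih x hm' hlt
    · -- x does not beat the accumulator: it is below the maximum, skip it on both sides
      rw [max_eq_left (by omega : x.2 ≤ b.2)] at hm'
      rw [List.find?_cons_of_neg (by simp; omega)]
      simp only [List.foldl_cons]
      rw [if_neg hx]
      exact ih b hm' h

-- counts.index(m) followed by cycles[...] is find? on the pair list (m an upper bound of the counts)
lemma pvIndex_chain (L : List (String × Int)) (m : Int)
    (h : ∀ x ∈ L, x.2 ≤ m) :
    ((PySem.List.index? (L.map Prod.snd) m).bind
        (fun i => PySem.List.pyGet? (L.map Prod.fst) (i : Int)))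
      = Option.map Prod.fst (L.find? (fun x => decide (m ≤ x.2))) := by
  induction L with
  | nil => simp [PySem.List.index?]
  | cons x t ih =>
    by_cases hx : x.2 = m
    · rw [List.map_cons, show (x.2 :: t.map Prod.snd) = (m :: t.map Prod.snd) by rw [hx],
        PySem.List.index?_cons_self]
      rw [List.find?_cons_of_pos (by simp [hx])]
      simp
    · have hxm : x.2 < m := lt_of_le_of_ne (h x (List.mem_cons_self ..)) hx
      rw [List.map_cons, PySem.List.index?_cons_of_ne _ (by omega)]
      rw [List.find?_cons_of_neg (by simp; omega)]
      rw [← ih (fun y hy => h y (List.mem_cons_of_mem _ hy))]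
      cases hidx : PySem.List.index? (t.map Prod.snd) m with
      | none => simp
      | some i =>
        simp only [Option.map_some, Option.bind_some, List.map_cons]
        rw [show ((i + 1 : Nat) : Int) = (i : Int) + 1 by push_cast; ring,
          PySem.List.pyGet?_cons_succ]

-- B's staged selection (max of counts, first index, lookup) equals the strict-max fold
lemma pvMainB (L : List (String × Int)) (hne : L ≠ [])
    (hpos : ∀ p ∈ L, 0 ≤ p.2)
    (out0 : List (String × String)) (f : String × Int → List (String × String)) :
    (if ((PySem.List.max? (L.map Prod.snd) (fun c => c)).getD 0) = 0 then out0
     else f ((((PySem.List.index? (L.map Prod.snd)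
                  ((PySem.List.max? (L.map Prod.snd) (fun c => c)).getD 0)).bind
              (fun i => PySem.List.pyGet? (L.map Prod.fst) (i : Int))).getD ""),
             ((PySem.List.max? (L.map Prod.snd) (fun c => c)).getD 0)))
  = (if (L.foldl (fun b y => if y.2 > b.2 then y else b) ("unknown", 0)).2 = 0
     then out0
     else f (L.foldl (fun b y => if y.2 > b.2 then y else b) ("unknown", 0))) := by
  obtain ⟨x, t, rfl⟩ := List.exists_cons_of_ne_nil hne
  have hx0 : 0 ≤ x.2 := hpos x (List.mem_cons_self ..)
  have hmax : (PySem.List.max? ((x :: t).map Prod.snd) (fun c => c)).getD 0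
      = pvMaxSnd t x.2 := by
    rw [List.map_cons, PySem.List.max?_id_cons]
    simp only [Option.getD_some, pvMaxSnd]
    rw [List.foldl_map]
  have hsnd : ((x :: t).foldl (fun b y => if y.2 > b.2 then y else b) ("unknown", 0)).2
      = pvMaxSnd t x.2 := by
    rw [pvF_snd]
    show pvMaxSnd t (max 0 x.2) = pvMaxSnd t x.2
    rw [max_eq_right hx0]
  rw [hmax, hsnd]
  by_cases h0 : pvMaxSnd t x.2 = 0
  · rw [if_pos h0, if_pos h0]
  · rw [if_neg h0, if_neg h0]
    have hpos' : (0 : Int) < pvMaxSnd t x.2 := by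
      have := pvMaxSnd_init_le t x.2
      omega
    have hm0 : pvMaxSnd t x.2
        = pvMaxSnd (x :: t) ((("unknown", (0 : Int)) : String × Int)).2 := by
      show pvMaxSnd t x.2 = pvMaxSnd t (max 0 x.2)
      rw [max_eq_right hx0]
    have hub : ∀ y ∈ x :: t, y.2 ≤ pvMaxSnd t x.2 := by
      intro y hy
      rcases List.mem_cons.mp hy with rfl | hy'
      · exact pvMaxSnd_init_le t y.2
      · exact pvMaxSnd_ge_mem t x.2 y hy'
    rw [pvIndex_chain _ _ hub, pvFind_eq_pvF _ _ _ hm0 hpos']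
    simp only [Option.map_some, Option.getD_some]
    congr 1
    exact Prod.ext rfl hsnd.symm

-- ===== VERDICT (by name: the statement is the Claim_ definition above) =====
theorem detect_billing_cycle_spec : Claim_equal_detect_billing_cycle := by
  intro d _
  unfold Spec_detect_billing_cycle
  simp only [detect_billing_cycle, detect_billing_cycle_alt]
  rw [pvFoldA]
  -- align B's count table / cycle list with the pair list A folds over
  have hc : pvPatterns.map (fun cp => pvHits cp.2 (PySem.Str.lower d))
      = (pvPatterns.map (fun cp => (cp.1, pvCnt (PySem.Str.lower d) cp.2))).map Prod.snd := by
    rw [List.map_map]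
    exact List.map_congr_left fun cp _ => (pvCnt_eq_hits _ _).symm
  have hf : pvPatterns.map Prod.fst
      = (pvPatterns.map (fun cp => (cp.1, pvCnt (PySem.Str.lower d) cp.2))).map Prod.fst := by
    rw [List.map_map]; rfl
  rw [hc, hf]
  have hLpos : ∀ p ∈ pvPatterns.map (fun cp => (cp.1, pvCnt (PySem.Str.lower d) cp.2)), 0 ≤ p.2 := by
    intro p hp
    obtain ⟨cp, _, rfl⟩ := List.mem_map.mp hp
    exact pvCnt_nonneg _ cp.2
  refine Eq.trans
    (pvMain (pvPatterns.map (fun cp => (cp.1, pvCnt (PySem.Str.lower d) cp.2))) hLpos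
      [("cycle", "unknown"), ("confidence", "low"),
       ("reasoning", "No billing cycle indicators found in description")]
      (fun b => [("cycle", b.1), ("confidence", if b.2 ≥ 2 then "high" else "medium"),
        ("reasoning", "Detected " ++ b.1 ++ " billing from " ++ PySem.Int.toStr b.2 ++ " indicator(s)")])) ?_
  exact (pvMainB (pvPatterns.map (fun cp => (cp.1, pvCnt (PySem.Str.lower d) cp.2)))
      (by simp [pvPatterns]) hLpos _
      (fun b => [("cycle", b.1), ("confidence", if b.2 ≥ 2 then "high" else "medium"),
        ("reasoning", "Detected " ++ b.1 ++ " billing from " ++ PySem.Int.toStr b.2 ++ " indicator(s)")])).symm
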